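-- pv_equiv track=rewrite | github.com/mohammadfaiizan/ProjectI | DSA/Problem/Queue_Stack/04_Deque_Double_Ended_Queue/1499_Max_Value_of_Equation.py | findMaxValueOfEquation_deque_approach
-- ===== SOURCE A (Python) =====
-- from typing import List, Deque
-- from collections import deque
--
-- def findMaxValueOfEquation_deque_approach(points: List[List[int]], k: int) -> int:
--     """
--     Approach 1: Monotonic Deque (Optimal)
--
--     Transform equation and use deque to maintain maximum values.
--
--     Time: O(n), Space: O(n)
--     """
--     # Transform: yi + yj + |xi - xj| where xi <= xj (sorted)
--     # = yi + yj + xj - xi = (yi - xi) + (yj + xj)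
--     # For each j, find maximum (yi - xi) where xi >= xj - k
--
--     dq: Deque[int] = deque()  # Store indices
--     max_value = float('-inf')
--
--     for j in range(len(points)):
--         xj, yj = points[j]
--
--         # Remove points where xi < xj - k (outside valid range)
--         while dq and points[dq[0]][0] < xj - k:
--             dq.popleft()
--
--         # Calculate max value using best previous point
--         if dq:
--             i = dq[0]
--             xi, yi = points[i]
--             value = yi + yj + xj - xi
--             max_value = max(max_value, value)
--
--         # Maintain decreasing order of (yi - xi)
--         while dq and (points[dq[-1]][1] - points[dq[-1]][0]) <= (yj - xj):
--             dq.pop()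
--
--         dq.append(j)
--
--     return max_value
-- ===== SOURCE B (Python) =====
-- def findMaxValueOfEquation_deque_approach(points, k):
--     """
--     Alternative: unordered candidate pool with a linear max-scan.
--
--     Instead of a monotonic deque, keep an unordered list of (x, y - x)
--     candidates; expire the best candidate while it is out of range, read it
--     otherwise, then drop candidates dominated by the new point.
--
--     Time: O(n^2), Space: O(n)
--     """
--     best = float('-inf')
--     cands = []  # (x, y - x) of still-useful earlier points
--     for x, y in points:
--         while cands:
--             bx, bf = max(cands, key=lambda c: c[1])
--             if bx < x - k:
--                 cands.remove((bx, bf))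
--             else:
--                 best = max(best, bf + y + x)
--                 break
--         cands = [c for c in cands if c[1] > y - x]
--         cands.append((x, y - x))
--     return best
-- ===== Notes on version B (the rewrite author's own statement) =====
-- stated objective: alternative
-- what changed: Replaced the order-maintained monotonic deque by an unordered candidate pool: each step scans the pool linearly for the max (y-x) candidate, lazily removing out-of-range maxima and filtering dominated candidates, instead of popping from the two ends of a deque.
-- outside the precondition, e.g. on findMaxValueOfEquation_deque_approach([[0, 0], [10, 0]], 1): A returns -inf, B returns -inf; on findMaxValueOfEquation_deque_approach([[1, 2, 3], [4, 5, 6]], 10): A raises ValueError, B raises ValueError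
import Mathlib
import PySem

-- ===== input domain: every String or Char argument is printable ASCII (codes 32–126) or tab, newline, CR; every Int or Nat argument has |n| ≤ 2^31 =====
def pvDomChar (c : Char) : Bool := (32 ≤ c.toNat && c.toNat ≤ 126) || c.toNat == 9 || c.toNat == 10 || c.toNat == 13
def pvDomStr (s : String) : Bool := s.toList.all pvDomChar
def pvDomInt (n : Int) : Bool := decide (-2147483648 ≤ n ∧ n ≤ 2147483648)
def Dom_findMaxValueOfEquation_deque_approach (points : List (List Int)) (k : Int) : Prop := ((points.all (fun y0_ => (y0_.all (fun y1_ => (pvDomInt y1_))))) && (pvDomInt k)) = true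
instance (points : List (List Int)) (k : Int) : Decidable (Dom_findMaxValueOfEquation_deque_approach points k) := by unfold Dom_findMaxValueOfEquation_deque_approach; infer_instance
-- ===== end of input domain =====

-- B replaces A's monotonic deque by an unordered candidate pool scanned linearly for its
-- maximum (alternative data structure, same results; O(n^2) instead of O(n), not faster).

-- ===== PORT A =====
-- x / y coordinate of points[i] (points[dq[0]][0] etc. in A's source)
def pvXat (points : List (List Int)) (i : Nat) : Int :=
  PySem.List.pyGetD (PySem.List.pyGetD points (i : Int) []) 0 0
def pvYat (points : List (List Int)) (i : Nat) : Int :=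
  PySem.List.pyGetD (PySem.List.pyGetD points (i : Int) []) 1 0

-- One iteration of A's `for j in range(len(points))` loop; state = (deque of indices, max_value).
-- Python's float('-inf') initial max_value is modeled as `none` (Pre_ guarantees it is updated).
def pvStepA (points : List (List Int)) (k : Int) (st : List Nat × Option Int) (j : Nat) :
    List Nat × Option Int :=
  let p := PySem.List.pyGetD points (j : Int) []
  let xj := PySem.List.pyGetD p 0 0
  let yj := PySem.List.pyGetD p 1 0
  -- while dq and points[dq[0]][0] < xj - k: dq.popleft()
  let dq := st.1.dropWhile (fun i => pvXat points i < xj - k)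
  -- if dq: i = dq[0]; value = yi + yj + xj - xi; max_value = max(max_value, value)
  let best : Option Int :=
    match dq with
    | [] => st.2
    | i :: _ =>
      let xi := pvXat points i
      let yi := pvYat points i
      let value := yi + yj + xj - xi
      some (match st.2 with | none => value | some b => max b value)
  -- while dq and (points[dq[-1]][1] - points[dq[-1]][0]) <= (yj - xj): dq.pop()
  let dq2 := (dq.reverse.dropWhile (fun i => pvYat points i - pvXat points i ≤ yj - xj)).reverse
  (dq2 ++ [j], best)

def findMaxValueOfEquation_deque_approach (points : List (List Int)) (k : Int) : Int :=
  (((List.range points.length).foldl (pvStepA points k) ([], none)).2).getD 0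

-- ===== PORT B =====
-- B's inner while loop: pop the best candidate while it is out of range, read it otherwise.
-- fuel = len(cands) + 1 bounds the iterations exactly (each pass removes one element).
-- `(remove? …).getD cands` is exact here: the removed element is max? 's result, a member.
def pvExpire (k x y : Int) : Nat → List (Int × Int) → Option Int → List (Int × Int) × Option Int
  | 0, cands, best => (cands, best)
  | fuel + 1, cands, best =>
    match PySem.List.max? cands (fun c => c.2) with
    | none => (cands, best)      -- while cands: … exits (pool empty)
    | some c =>
      if c.1 < x - k then
        pvExpire k x y fuel ((PySem.List.remove? cands c).getD cands) best
      else
        (cands, some (match best with | none => c.2 + y + x | some b => max b (c.2 + y + x)))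

-- One iteration of B's outer loop; state = (candidate pool, best). none models float('-inf').
def pvStepB (k : Int) (st : List (Int × Int) × Option Int) (p : List Int) :
    List (Int × Int) × Option Int :=
  let x := PySem.List.pyGetD p 0 0
  let y := PySem.List.pyGetD p 1 0
  let r := pvExpire k x y (st.1.length + 1) st.1 st.2
  -- cands = [c for c in cands if c[1] > y - x]; cands.append((x, y - x))
  (r.1.filter (fun c => c.2 > y - x) ++ [(x, y - x)], r.2)

def findMaxValueOfEquation_deque_approach_alt (points : List (List Int)) (k : Int) : Int :=
  ((points.foldl (pvStepB k) ([], none)).2).getD 0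

-- ===== PRECONDITION & SPEC =====
-- Pre_ is exactly the inputs on which the Python A returns an int: rows not of length 2 make
-- A raise ValueError, and without an adjacent pair with x_j - x_{j-1} ≤ k no update ever
-- happens and A returns float('-inf'), which is not a value of the declared return type.
def Pre_findMaxValueOfEquation_deque_approach (points : List (List Int)) (k : Int) : Prop :=
  (∀ p ∈ points, p.length = 2) ∧
  ∃ pr ∈ points.zip points.tail, PySem.List.pyGetD pr.2 0 0 - PySem.List.pyGetD pr.1 0 0 ≤ k

instance (points : List (List Int)) (k : Int) :
    Decidable (Pre_findMaxValueOfEquation_deque_approach points k) := by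
  unfold Pre_findMaxValueOfEquation_deque_approach; infer_instance

def pvWitness_findMaxValueOfEquation_deque_approach : List (List Int) × Int := ([[0, 0], [1, 0]], 1)

def Spec_findMaxValueOfEquation_deque_approach (points : List (List Int)) (k : Int) (out : Int) : Prop := out = findMaxValueOfEquation_deque_approach_alt points k
instance (points : List (List Int)) (k : Int) (out : Int) : Decidable (Spec_findMaxValueOfEquation_deque_approach points k out) := by unfold Spec_findMaxValueOfEquation_deque_approach; infer_instance

-- ===== CLAIM (what is proved, stated in full; the proofs are below) =====
def Claim_equal_findMaxValueOfEquation_deque_approach : Prop := ∀ (points : List (List Int)) (k : Int), Dom_findMaxValueOfEquation_deque_approach points k → Pre_findMaxValueOfEquation_deque_approach points k → Spec_findMaxValueOfEquation_deque_approach points k (findMaxValueOfEquation_deque_approach points k)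

-- ===== LEMMAS AND PROOFS =====

-- y - x of the row with index i
def pF (points : List (List Int)) (i : Nat) : Int := pvYat points i - pvXat points i

-- the candidate pair B stores for index i
def pvE (points : List (List Int)) (i : Nat) : Int × Int := (pvXat points i, pF points i)

-- the row read at an in-range index is the list element
lemma pv_row (points : List (List Int)) (m : Nat) (hm : m < points.length) :
    PySem.List.pyGetD points (m : Int) [] = points[m] := by
  rw [PySem.List.pyGetD_natCast, List.getD_eq_getElem _ _ hm]

-- max? with a strictly dominated tail returns the head
lemma pv_max_head {l : List (Int × Int)} {a : Int × Int}
    (h : ∀ y ∈ l, y.2 < a.2) :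
    PySem.List.max? (a :: l) (fun c => c.2) = some a := by
  cases hm : PySem.List.max? (a :: l) (fun c => c.2) with
  | none => rw [PySem.List.max?_eq_none_iff] at hm; simp at hm
  | some m =>
    have hmem := PySem.List.max?_mem hm
    have hmax := PySem.List.max?_isMax hm
    rcases List.mem_cons.1 hmem with rfl | hml
    · rfl
    · have h1 : a.2 ≤ m.2 := hmax a List.mem_cons_self
      have h2 : m.2 < a.2 := h m hml
      omega

-- removing the head of the pool
lemma pv_remove_head (a : Int × Int) (l : List (Int × Int)) :
    PySem.List.remove? (a :: l) a = some l := by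
  simp [PySem.List.remove?]
  exact ⟨0, by simp [List.idxOf?_cons], rfl⟩

-- B's while loop = A's popleft loop + conditional read, on a strictly f-decreasing pool
lemma pv_expire_eq (points : List (List Int)) (k xj yj : Int) :
    ∀ (l : List Nat) (fuel : Nat) (best : Option Int), l.length ≤ fuel →
      l.Pairwise (fun a b => pF points b < pF points a) →
      pvExpire k xj yj fuel (l.map (pvE points)) best =
        ((l.dropWhile (fun i => decide (pvXat points i < xj - k))).map (pvE points),
         match l.dropWhile (fun i => decide (pvXat points i < xj - k)) with
         | [] => best
         | h :: _ => some (match best with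
             | none => pF points h + yj + xj
             | some b => max b (pF points h + yj + xj))) := by
  intro l
  induction l with
  | nil =>
    intro fuel best _ _
    cases fuel <;> rfl
  | cons i rest ih =>
    intro fuel best hf hp
    rcases List.pairwise_cons.1 hp with ⟨hd, hp'⟩
    cases fuel with
    | zero => simp at hf
    | succ f =>
      rw [List.map_cons, pvExpire]
      rw [pv_max_head (a := pvE points i) (l := rest.map (pvE points)) ?dom]
      case dom =>
        intro y hy
        rcases List.mem_map.1 hy with ⟨t, htr, rfl⟩
        exact hd t htr
      dsimp only [pvE]
      by_cases hc : pvXat points i < xj - k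
      · rw [if_pos hc, pv_remove_head, Option.getD_some]
        rw [ih f best (by simp at hf ⊢; omega) hp']
        rw [List.dropWhile_cons_of_pos (by simpa using hc)]
      · rw [if_neg hc, List.dropWhile_cons_of_neg (by simpa using hc)]
        rfl

-- A's back-pop loop = B's dominance filter, on a strictly f-decreasing deque
lemma pv_backpop_eq (points : List (List Int)) (c : Int) :
    ∀ l : List Nat, l.Pairwise (fun a b => pF points b < pF points a) →
      (l.reverse.dropWhile (fun i => decide (pF points i ≤ c))).reverse =
        l.filter (fun i => decide (c < pF points i)) := by
  intro l
  induction l with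
  | nil => intro _; rfl
  | cons i rest ih =>
    intro hp
    rcases List.pairwise_cons.1 hp with ⟨hd, hp'⟩
    rw [List.reverse_cons]
    by_cases hc : pF points i ≤ c
    · have hall : (rest.reverse ++ [i]).dropWhile (fun t => decide (pF points t ≤ c)) = [] := by
        rw [List.dropWhile_eq_nil_iff]
        intro t ht
        rcases List.mem_append.1 ht with ht | ht
        · have := hd t (List.mem_reverse.1 ht); simp; omega
        · simp at ht; subst ht; simpa using hc
      rw [hall]
      have hfil : (i :: rest).filter (fun t => decide (c < pF points t)) = [] := by
        rw [List.filter_eq_nil_iff]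
        intro t ht
        rcases List.mem_cons.1 ht with rfl | ht
        · simpa using hc
        · have := hd t ht; simp; omega
      rw [hfil]; rfl
    · rw [List.dropWhile_append]
      have hi : ([i].dropWhile (fun t => decide (pF points t ≤ c))) = [i] :=
        List.dropWhile_cons_of_neg (by simpa using hc)
      by_cases he : (rest.reverse.dropWhile (fun t => decide (pF points t ≤ c))).isEmpty
      · rw [if_pos he, hi]
        have : rest.filter (fun t => decide (c < pF points t)) = [] := by
          rw [List.isEmpty_iff, List.dropWhile_eq_nil_iff] at he
          rw [List.filter_eq_nil_iff]
          intro t ht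
          have := he t (List.mem_reverse.2 ht)
          simp at this ⊢; omega
        rw [List.filter_cons_of_pos (by simpa using hc), this]
        rfl
      · rw [if_neg he, List.reverse_append, List.reverse_cons, List.reverse_nil,
          List.nil_append, ih hp', List.filter_cons_of_pos (by simpa using hc)]
        rfl

-- the main induction: A's and B's states stay related
lemma pv_main (points : List (List Int)) (k : Int) :
    ∀ m, m ≤ points.length →
      ((List.range m).foldl (pvStepA points k) ([], none)).1.Pairwise
        (fun a b => pF points b < pF points a) ∧
      ((points.take m).foldl (pvStepB k) ([], none)).1 =
        ((List.range m).foldl (pvStepA points k) ([], none)).1.map (pvE points) ∧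
      ((List.range m).foldl (pvStepA points k) ([], none)).2 =
        ((points.take m).foldl (pvStepB k) ([], none)).2 := by
  intro m
  induction m with
  | zero => intro _; exact ⟨by simp, rfl, rfl⟩
  | succ m ih =>
    intro hm1
    have hm : m < points.length := by omega
    obtain ⟨hpair, hseen, hbest⟩ := ih (by omega)
    set stA := (List.range m).foldl (pvStepA points k) (([], none) : List Nat × Option Int)
      with hstA
    set stB := (points.take m).foldl (pvStepB k) (([], none) : List (Int × Int) × Option Int)
      with hstB
    have hSA : (List.range (m+1)).foldl (pvStepA points k) ([], none)
        = pvStepA points k stA m := by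
      rw [List.range_succ, List.foldl_append, List.foldl_cons, List.foldl_nil]
    have hSB : (points.take (m+1)).foldl (pvStepB k) ([], none)
        = pvStepB k stB (PySem.List.pyGetD points (m : Int) []) := by
      rw [List.take_succ_eq_append_getElem hm, List.foldl_append, List.foldl_cons,
        List.foldl_nil, pv_row points m hm]
    -- the deque after the front pops
    have hdq'pair : (stA.1.dropWhile
        (fun i => decide (pvXat points i < pvXat points m - k))).Pairwise
        (fun a b => pF points b < pF points a) :=
      hpair.sublist (List.dropWhile_sublist _)
    -- A's two components, written in the proof's vocabulary (definitional)
    have hA1 : (pvStepA points k stA m).1 =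
        ((stA.1.dropWhile (fun i => decide (pvXat points i < pvXat points m - k))).reverse.dropWhile (fun i => decide (pF points i ≤ pF points m))).reverse
          ++ [m] := rfl
    have hA2 : (pvStepA points k stA m).2 =
        match stA.1.dropWhile (fun i => decide (pvXat points i < pvXat points m - k)) with
        | [] => stA.2
        | h :: _ => some (match stA.2 with
            | none => pvYat points h + pvYat points m + pvXat points m - pvXat points h
            | some b => max b (pvYat points h + pvYat points m + pvXat points m
                - pvXat points h)) := rfl
    -- B's step, with the expiry loop rewritten by pv_expire_eq
    have hr : pvExpire k (pvXat points m) (pvYat points m) (stB.1.length + 1) stB.1 stB.2 =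
        ((stA.1.dropWhile (fun i => decide (pvXat points i < pvXat points m - k))).map
           (pvE points),
         match stA.1.dropWhile (fun i => decide (pvXat points i < pvXat points m - k)) with
         | [] => stA.2
         | h :: _ => some (match stA.2 with
             | none => pF points h + pvYat points m + pvXat points m
             | some b => max b (pF points h + pvYat points m + pvXat points m))) := by
      rw [hseen, hbest]
      exact pv_expire_eq points k (pvXat points m) (pvYat points m) stA.1
        ((stA.1.map (pvE points)).length + 1) stB.2 (by simp) hpair
    have hB1 : (pvStepB k stB (PySem.List.pyGetD points (m : Int) [])).1 =
        (pvExpire k (pvXat points m) (pvYat points m) (stB.1.length + 1) stB.1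
          stB.2).1.filter (fun c => decide (pF points m < c.2)) ++ [pvE points m] := rfl
    have hB2 : (pvStepB k stB (PySem.List.pyGetD points (m : Int) [])).2 =
        (pvExpire k (pvXat points m) (pvYat points m) (stB.1.length + 1) stB.1 stB.2).2 :=
      rfl
    refine ⟨?_, ?_, ?_⟩
    · -- the new deque is still strictly f-decreasing
      rw [hSA, hA1, pv_backpop_eq points (pF points m) _ hdq'pair]
      rw [List.pairwise_append]
      refine ⟨hdq'pair.sublist List.filter_sublist, by simp, ?_⟩
      intro a ha b hb
      simp at hb; subst hb
      have := (List.mem_filter.1 ha).2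
      simpa using this
    · -- pool = image of deque
      rw [hSA, hSB, hB1, hA1, hr, pv_backpop_eq points (pF points m) _ hdq'pair]
      dsimp only
      rw [List.map_append]
      congr 1
      rw [List.filter_map]
      rfl
    · -- same best value
      rw [hSA, hSB, hB2, hA2, hr]
      cases stA.1.dropWhile (fun i => decide (pvXat points i < pvXat points m - k)) with
      | nil => rfl
      | cons h t =>
        have hv : pvYat points h + pvYat points m + pvXat points m - pvXat points h =
            pF points h + pvYat points m + pvXat points m := by unfold pF; ring
        dsimp only
        rw [hv]

-- ===== VERDICT (by name: the statement is the Claim_ definition above) =====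
theorem findMaxValueOfEquation_deque_approach_spec : Claim_equal_findMaxValueOfEquation_deque_approach := by
  intro points k _ _
  unfold Spec_findMaxValueOfEquation_deque_approach
  have h := (pv_main points k points.length le_rfl).2.2
  unfold findMaxValueOfEquation_deque_approach findMaxValueOfEquation_deque_approach_alt
  rw [List.take_length] at h
  rw [h]
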